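-- pv_equiv track=rewrite | github.com/hihiroo/Game | NemoNemoLogic.py | make_ans_row
-- ===== SOURCE A (Python) =====
-- def make_ans_row(board,size):
--     length = size + len(board)
--     ans_row = ans_row = [[' ']*length for x in range(size)]
--     for y in range(len(board)):
--         cnt = 0
--         lv = size-1
--         for x in range(len(board)-1,-1,-1):
--             if board[x][y] == '*':
--                 cnt += 1
--             else:
--                 if cnt > 0:
--                     ans_row[lv][size+y] = str(cnt)
--                     lv -= 1
--                     cnt = 0
--         if cnt > 0:
--             ans_row[lv][size+y] = str(cnt)
--     return ans_row
-- ===== SOURCE B (Python) =====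
-- def make_ans_row(board, size):
--     n = len(board)
--     ans_row = [[' '] * (size + n) for _ in range(size)]
--     for y in range(n):
--         runs = []
--         cnt = 0
--         for x in range(n):
--             if board[x][y] == '*':
--                 cnt += 1
--             elif cnt > 0:
--                 runs.append(cnt)
--                 cnt = 0
--         if cnt > 0:
--             runs.append(cnt)
--         for i, r in enumerate(reversed(runs)):
--             ans_row[size - 1 - i][size + y] = str(r)
--     return ans_row
-- ===== Notes on version B (the rewrite author's own statement) =====
-- stated objective: alternative
-- what changed: A interleaves a moving write-pointer with a backward (bottom-up) scan of each column, writing a hint digit the moment a run ends; B is a two-pass decomposition: it scans each column forward (top-down) building the list of '*'-run lengths, then places that list bottom-aligned into the grid in a separate enumerate loop.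
import Mathlib
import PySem

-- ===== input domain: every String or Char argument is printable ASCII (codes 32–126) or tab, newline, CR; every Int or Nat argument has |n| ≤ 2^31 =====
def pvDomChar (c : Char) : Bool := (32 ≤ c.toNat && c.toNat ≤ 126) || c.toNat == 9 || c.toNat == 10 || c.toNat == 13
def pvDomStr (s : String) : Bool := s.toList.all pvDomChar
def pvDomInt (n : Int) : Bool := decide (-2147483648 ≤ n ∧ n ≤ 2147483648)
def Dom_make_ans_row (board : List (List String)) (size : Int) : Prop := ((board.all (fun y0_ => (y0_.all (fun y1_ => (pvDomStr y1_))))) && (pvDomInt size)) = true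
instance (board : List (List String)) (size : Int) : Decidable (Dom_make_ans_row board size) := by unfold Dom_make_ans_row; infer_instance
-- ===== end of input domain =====

-- B replaces A's interleaved moving-pointer writes during a bottom-up column scan by a two-pass
-- decomposition (top-down run-length collection, then bottom-aligned placement); alternative, not faster.


-- ===== PORT A =====
-- Python 'g[i][j] = v' (negative indices from the end); total form, exact under Pre_'s in-range guarantee
def setCell (g : List (List String)) (i j : Int) (v : String) : List (List String) :=
  PySem.List.pySetD g i (PySem.List.pySetD (PySem.List.pyGetD g i []) j v)

def make_ans_row (board : List (List String)) (size : Int) : List (List String) :=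
  let length := size + PySem.List.len board
  (PySem.List.pyRange 0 (PySem.List.len board) 1).foldl
    (fun ans_row y =>
      let r := (PySem.List.pyRange (PySem.List.len board - 1) (-1) (-1)).foldl
          (fun (st : Int × Int × List (List String)) x =>
            if PySem.List.pyGetD (PySem.List.pyGetD board x []) y "" == "*" then
              (st.1 + 1, st.2.1, st.2.2)
            else if st.1 > 0 then
              (0, st.2.1 - 1, setCell st.2.2 st.2.1 (size + y) (PySem.Int.toStr st.1))
            else st)
          (0, size - 1, ans_row)
      if r.1 > 0 then setCell r.2.2 r.2.1 (size + y) (PySem.Int.toStr r.1) else r.2.2)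
    ((PySem.List.pyRange 0 size 1).map (fun _ => PySem.List.pyRepeat [" "] length))

-- ===== PORT B =====
def make_ans_row_alt (board : List (List String)) (size : Int) : List (List String) :=
  let n := PySem.List.len board
  (PySem.List.pyRange 0 n 1).foldl
    (fun ans_row y =>
      let rc := (PySem.List.pyRange 0 n 1).foldl
          (fun (st : List Int × Int) x =>
            if PySem.List.pyGetD (PySem.List.pyGetD board x []) y "" == "*" then (st.1, st.2 + 1)
            else if st.2 > 0 then (st.1 ++ [st.2], 0)
            else st)
          ([], 0)
      let runs := if rc.2 > 0 then rc.1 ++ [rc.2] else rc.1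
      (PySem.List.enumerate runs.reverse).foldl
        (fun g p => setCell g (size - 1 - p.1) (size + y) (PySem.Int.toStr p.2)) ans_row)
    ((PySem.List.pyRange 0 size 1).map (fun _ => PySem.List.pyRepeat [" "] (size + n)))

-- ===== PRECONDITION & SPEC =====
-- number of maximal runs of "*" in a list of cells (prev = was the previous cell a star)
def countRuns : List String → Bool → Nat
  | [], _ => 0
  | c :: cs, prev =>
    if c == "*" then (if prev then countRuns cs true else countRuns cs true + 1)
    else countRuns cs false

-- Pre_ = exactly the inputs where Python A returns normally: every row must reach every column index
-- (else board[x][y] is an IndexError), and each column's star-run count k must satisfy k = 0 or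
-- k ≤ 2*size (the k-th hint is written at row index size-k, an IndexError below -size).
def Pre_make_ans_row (board : List (List String)) (size : Int) : Prop :=
  (∀ r ∈ board, board.length ≤ r.length) ∧
  ∀ y < board.length,
    (countRuns (board.map (fun r => r.getD y "")) false = 0 ∨
     (countRuns (board.map (fun r => r.getD y "")) false : Int) ≤ 2 * size)
instance (board : List (List String)) (size : Int) : Decidable (Pre_make_ans_row board size) := by
  unfold Pre_make_ans_row; infer_instance

def pvWitness_make_ans_row : List (List String) × Int := ([["*", "."], [".", "*"]], 2)

def Spec_make_ans_row (board : List (List String)) (size : Int) (out : List (List String)) : Prop := out = make_ans_row_alt board size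
instance (board : List (List String)) (size : Int) (out : List (List String)) : Decidable (Spec_make_ans_row board size out) := by unfold Spec_make_ans_row; infer_instance

-- ===== CLAIM (what is proved, stated in full; the proofs are below) =====
def Claim_equal_make_ans_row : Prop := ∀ (board : List (List String)) (size : Int), Dom_make_ans_row board size → Pre_make_ans_row board size → Spec_make_ans_row board size (make_ans_row board size)

-- ===== LEMMAS AND PROOFS =====
-- (the two ports are in fact equal on ALL inputs; Pre_ only marks where the Pythons return)

-- run lengths of maximal t-runs, scanning left to right, with an open run of length cnt pending
def runsF {α : Type} (t : α → Bool) : List α → Int → List Int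
  | [], cnt => if cnt > 0 then [cnt] else []
  | x :: xs, cnt =>
    if t x then runsF t xs (cnt + 1)
    else if cnt > 0 then cnt :: runsF t xs 0 else runsF t xs cnt

-- write the run lengths into column j, at rows lv, lv-1, …
def place (j : Int) (g : List (List String)) (lv : Int) : List Int → List (List String)
  | [] => g
  | r :: rs => place j (setCell g lv j (PySem.Int.toStr r)) (lv - 1) rs

def bumpHead : List Int → List Int
  | [] => [1]
  | a :: l => (a + 1) :: l

def bumpLast : List Int → List Int
  | [] => [1]
  | [a] => [a + 1]
  | a :: b :: l => a :: bumpLast (b :: l)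

-- does the pending state (xs, cnt) end inside a run?
def endsT {α : Type} (t : α → Bool) (xs : List α) (cnt : Int) : Bool :=
  match xs.getLast? with
  | some x => t x
  | none => decide (0 < cnt)

theorem bumpLast_cons {a : Int} {l : List Int} (h : l ≠ []) :
    bumpLast (a :: l) = a :: bumpLast l := by
  cases l with
  | nil => exact absurd rfl h
  | cons b l => rfl

theorem bumpLast_append (l : List Int) (a : Int) : bumpLast (l ++ [a]) = l ++ [a + 1] := by
  induction l with
  | nil => rfl
  | cons b l ih =>
    cases l with
    | nil => rfl
    | cons c l => simpa [bumpLast_cons] using ih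

theorem bumpLast_reverse (l : List Int) : bumpLast l.reverse = (bumpHead l).reverse := by
  cases l with
  | nil => rfl
  | cons a l => simp [bumpHead, bumpLast_append]

theorem runsF_succ {α : Type} (t : α → Bool) :
    ∀ (l : List α) (cnt : Int), 1 ≤ cnt → runsF t l (cnt + 1) = bumpHead (runsF t l cnt) := by
  intro l
  induction l with
  | nil =>
    intro cnt h
    have h1 : cnt + 1 > 0 := by omega
    have h2 : cnt > 0 := by omega
    simp [runsF, h1, h2, bumpHead]
  | cons x xs ih =>
    intro cnt h
    by_cases hx : t x
    · simpa [runsF, hx] using ih (cnt + 1) (by omega)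
    · have h1 : cnt + 1 > 0 := by omega
      have h2 : cnt > 0 := by omega
      simp [runsF, hx, h1, h2, bumpHead]

theorem runsF_snoc_neg {α : Type} (t : α → Bool) {x : α} (hx : ¬ t x) :
    ∀ (l : List α) (cnt : Int), runsF t (l ++ [x]) cnt = runsF t l cnt := by
  intro l
  induction l with
  | nil => intro cnt; simp [runsF, hx]
  | cons y ys ih =>
    intro cnt
    by_cases hy : t y <;> simp [runsF, hy, ih]

theorem endsT_cons_cons {α : Type} (t : α → Bool) (y z : α) (zs : List α) (c1 c2 : Int) :
    endsT t (y :: z :: zs) c1 = endsT t (z :: zs) c2 := by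
  unfold endsT
  rw [List.getLast?_cons_cons]
  cases hzl : (z :: zs).getLast? with
  | none => simp at hzl
  | some w => rfl

theorem runsF_ne_nil {α : Type} (t : α → Bool) :
    ∀ (l : List α) (cnt : Int), 0 ≤ cnt → endsT t l cnt → runsF t l cnt ≠ [] := by
  intro l
  induction l with
  | nil =>
    intro cnt h he
    simp [endsT] at he
    simp [runsF, he]
  | cons x xs ih =>
    intro cnt h he
    by_cases hx : t x
    · have hrw : runsF t (x :: xs) cnt = runsF t xs (cnt + 1) := by simp [runsF, hx]
      rw [hrw]
      refine ih (cnt + 1) (by omega) ?_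
      cases xs with
      | nil => simp [endsT]; omega
      | cons z zs => exact (endsT_cons_cons t x z zs cnt (cnt + 1)) ▸ he
    · cases xs with
      | nil => simp [endsT, hx] at he
      | cons z zs =>
        have he' : endsT t (z :: zs) 0 := (endsT_cons_cons t x z zs cnt 0) ▸ he
        by_cases hc : cnt > 0
        · simp [runsF, hx, hc]
        · have hc0 : cnt = 0 := by omega
          subst hc0
          have hrw : runsF t (x :: z :: zs) 0 = runsF t (z :: zs) 0 := by
            simp [runsF, hx]
          rw [hrw]; exact ih 0 le_rfl he'

theorem runsF_snoc_pos {α : Type} (t : α → Bool) {x : α} (hx : t x) :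
    ∀ (l : List α) (cnt : Int), 0 ≤ cnt →
      runsF t (l ++ [x]) cnt =
        (if endsT t l cnt then bumpLast (runsF t l cnt) else runsF t l cnt ++ [1]) := by
  intro l
  induction l with
  | nil =>
    intro cnt h
    by_cases hc : 0 < cnt
    · simp [runsF, endsT, hx, hc, bumpLast, h]
    · have hc0 : cnt = 0 := by omega
      simp [hc0, runsF, endsT, hx]
  | cons y ys ih =>
    intro cnt h
    by_cases hy : t y
    · have h1 : runsF t ((y :: ys) ++ [x]) cnt = runsF t (ys ++ [x]) (cnt + 1) := by
        simp [runsF, hy]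
      have h2 : runsF t (y :: ys) cnt = runsF t ys (cnt + 1) := by simp [runsF, hy]
      rw [h1, ih (cnt + 1) (by omega), h2]
      have he : endsT t ys (cnt + 1) = endsT t (y :: ys) cnt := by
        cases ys with
        | nil => simp [endsT, hy]; omega
        | cons z zs => exact (endsT_cons_cons t y z zs (cnt + 1) cnt).symm
      rw [he]
    · by_cases hc : 0 < cnt
      · have h1 : runsF t ((y :: ys) ++ [x]) cnt = cnt :: runsF t (ys ++ [x]) 0 := by
          simp [runsF, hy, hc]
        have h2 : runsF t (y :: ys) cnt = cnt :: runsF t ys 0 := by simp [runsF, hy, hc]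
        rw [h1, ih 0 le_rfl, h2]
        cases ys with
        | nil => simp [endsT, hy, runsF]
        | cons z zs =>
          have he : endsT t (y :: z :: zs) cnt = endsT t (z :: zs) 0 := endsT_cons_cons t y z zs cnt 0
          rw [he]
          by_cases hend : endsT t (z :: zs) 0
          · rw [if_pos hend, if_pos hend,
              bumpLast_cons (runsF_ne_nil t (z :: zs) 0 le_rfl hend)]
          · simp [hend]
      · have hc0 : cnt = 0 := by omega
        have h1 : runsF t ((y :: ys) ++ [x]) cnt = runsF t (ys ++ [x]) 0 := by
          simp [runsF, hy, hc0]
        have h2 : runsF t (y :: ys) cnt = runsF t ys 0 := by simp [runsF, hy, hc0]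
        rw [h1, ih 0 le_rfl, h2]
        cases ys with
        | nil => simp [endsT, hy, runsF]
        | cons z zs =>
          have he : endsT t (y :: z :: zs) cnt = endsT t (z :: zs) 0 := endsT_cons_cons t y z zs cnt 0
          rw [he]

theorem runsF_reverse {α : Type} (t : α → Bool) :
    ∀ l : List α, runsF t l.reverse 0 = (runsF t l 0).reverse := by
  intro l
  induction l with
  | nil => rfl
  | cons x xs ih =>
    have hrv : (x :: xs).reverse = xs.reverse ++ [x] := by simp
    rw [hrv]
    by_cases hx : t x
    · rw [runsF_snoc_pos t hx xs.reverse 0 le_rfl]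
      have hends : endsT t xs.reverse 0 = (match xs.head? with
        | some z => t z
        | none => false) := by
        cases xs with
        | nil => simp [endsT]
        | cons z zs => simp [endsT, List.getLast?_reverse]
      cases xs with
      | nil => simp [endsT, runsF, hx]
      | cons z zs =>
        by_cases hz : t z
        · have hzs : (z :: zs).head? = some z := rfl
          rw [hends]
          simp only [hzs, hz, if_pos]
          rw [ih, bumpLast_reverse]
          have e1 : runsF t (x :: z :: zs) 0 = runsF t zs 2 := by
            simp [runsF, hx, hz]
          have e2 : runsF t (z :: zs) 0 = runsF t zs 1 := by simp [runsF, hz]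
          rw [e1, e2]
          have : (1 : Int) + 1 = 2 := by norm_num
          rw [← this, runsF_succ t zs 1 le_rfl]
        · rw [hends]
          simp only [List.head?_cons, hz]
          rw [ih]
          have e1 : runsF t (x :: z :: zs) 0 = 1 :: runsF t (z :: zs) 0 := by
            simp [runsF, hx, hz]
          rw [e1]
          simp
    · rw [runsF_snoc_neg t hx xs.reverse 0, ih]
      have : runsF t (x :: xs) 0 = runsF t xs 0 := by simp [runsF, hx]
      rw [this]

theorem loopA {α : Type} (t : α → Bool) (j : Int) :
    ∀ (l : List α) (cnt lv : Int) (g : List (List String)),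
      (if (l.foldl (fun (st : Int × Int × List (List String)) x =>
            if t x then (st.1 + 1, st.2.1, st.2.2)
            else if st.1 > 0 then (0, st.2.1 - 1, setCell st.2.2 st.2.1 j (PySem.Int.toStr st.1))
            else st) (cnt, lv, g)).1 > 0
       then setCell (l.foldl (fun (st : Int × Int × List (List String)) x =>
            if t x then (st.1 + 1, st.2.1, st.2.2)
            else if st.1 > 0 then (0, st.2.1 - 1, setCell st.2.2 st.2.1 j (PySem.Int.toStr st.1))
            else st) (cnt, lv, g)).2.2
              ((l.foldl (fun (st : Int × Int × List (List String)) x =>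
            if t x then (st.1 + 1, st.2.1, st.2.2)
            else if st.1 > 0 then (0, st.2.1 - 1, setCell st.2.2 st.2.1 j (PySem.Int.toStr st.1))
            else st) (cnt, lv, g)).2.1) j
              (PySem.Int.toStr ((l.foldl (fun (st : Int × Int × List (List String)) x =>
            if t x then (st.1 + 1, st.2.1, st.2.2)
            else if st.1 > 0 then (0, st.2.1 - 1, setCell st.2.2 st.2.1 j (PySem.Int.toStr st.1))
            else st) (cnt, lv, g)).1))
       else (l.foldl (fun (st : Int × Int × List (List String)) x =>
            if t x then (st.1 + 1, st.2.1, st.2.2)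
            else if st.1 > 0 then (0, st.2.1 - 1, setCell st.2.2 st.2.1 j (PySem.Int.toStr st.1))
            else st) (cnt, lv, g)).2.2)
      = place j g lv (runsF t l cnt) := by
  intro l
  induction l with
  | nil =>
    intro cnt lv g
    by_cases hc : cnt > 0 <;> simp [runsF, place, hc]
  | cons x xs ih =>
    intro cnt lv g
    by_cases hx : t x
    · simpa [hx, runsF] using ih (cnt + 1) lv g
    · by_cases hc : cnt > 0
      · have hr : runsF t (x :: xs) cnt = cnt :: runsF t xs 0 := by simp [runsF, hx, hc]
        rw [hr]
        simpa [hx, hc, place] using ih 0 (lv - 1) (setCell g lv j (PySem.Int.toStr cnt))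
      · have hr : runsF t (x :: xs) cnt = runsF t xs cnt := by simp [runsF, hx, hc]
        rw [hr]
        simpa [hx, hc] using ih cnt lv g

theorem loopB {α : Type} (t : α → Bool) :
    ∀ (l : List α) (acc : List Int) (cnt : Int),
      (if (l.foldl (fun (st : List Int × Int) x =>
            if t x then (st.1, st.2 + 1)
            else if st.2 > 0 then (st.1 ++ [st.2], 0) else st) (acc, cnt)).2 > 0
       then (l.foldl (fun (st : List Int × Int) x =>
            if t x then (st.1, st.2 + 1)
            else if st.2 > 0 then (st.1 ++ [st.2], 0) else st) (acc, cnt)).1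
            ++ [(l.foldl (fun (st : List Int × Int) x =>
            if t x then (st.1, st.2 + 1)
            else if st.2 > 0 then (st.1 ++ [st.2], 0) else st) (acc, cnt)).2]
       else (l.foldl (fun (st : List Int × Int) x =>
            if t x then (st.1, st.2 + 1)
            else if st.2 > 0 then (st.1 ++ [st.2], 0) else st) (acc, cnt)).1)
      = acc ++ runsF t l cnt := by
  intro l
  induction l with
  | nil =>
    intro acc cnt
    by_cases hc : cnt > 0 <;> simp [runsF, hc]
  | cons x xs ih =>
    intro acc cnt
    by_cases hx : t x
    · simpa [hx, runsF] using ih acc (cnt + 1)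
    · by_cases hc : cnt > 0
      · have hr : runsF t (x :: xs) cnt = cnt :: runsF t xs 0 := by simp [runsF, hx, hc]
        rw [hr]
        have := ih (acc ++ [cnt]) 0
        simpa [hx, hc] using this
      · have hr : runsF t (x :: xs) cnt = runsF t xs cnt := by simp [runsF, hx, hc]
        rw [hr]
        simpa [hx, hc] using ih acc cnt

theorem placeB (j size : Int) :
    ∀ (rs : List Int) (i : Int) (g : List (List String)),
      (PySem.List.enumerate rs i).foldl
        (fun g p => setCell g (size - 1 - p.1) j (PySem.Int.toStr p.2)) g
      = place j g (size - 1 - i) rs := by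
  intro rs
  induction rs with
  | nil => intro i g; simp [PySem.List.enumerate_nil, place]
  | cons r rs ih =>
    intro i g
    rw [PySem.List.enumerate_cons]
    simp only [List.foldl_cons]
    rw [ih (i + 1)]
    have : size - 1 - (i + 1) = size - 1 - i - 1 := by ring
    rw [this]
    rfl

theorem foldl_rows_rev {β : Type} (board : List (List String)) (f : β → List String → β) (init : β) :
    (PySem.List.pyRange (PySem.List.len board - 1) (-1) (-1)).foldl
      (fun acc x => f acc (PySem.List.pyGetD board x [])) init
    = board.reverse.foldl f init := by
  have h1 : PySem.List.pyRange (PySem.List.len board - 1) (-1) (-1)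
      = (PySem.List.pyRange 0 (PySem.List.len board) 1).reverse := by
    rw [PySem.List.pyRange_neg_one_eq_reverse]
    norm_num
  rw [h1,
    ← List.foldl_map (f := fun x => PySem.List.pyGetD board x ([] : List String)) (g := f),
    List.map_reverse, PySem.List.map_pyGetD_pyRange_zero]

theorem colEq (board : List (List String)) (size y : Int) (g : List (List String)) :
    (if (((PySem.List.pyRange (PySem.List.len board - 1) (-1) (-1)).foldl
          (fun (st : Int × Int × List (List String)) x =>
            if PySem.List.pyGetD (PySem.List.pyGetD board x []) y "" == "*" then
              (st.1 + 1, st.2.1, st.2.2)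
            else if st.1 > 0 then
              (0, st.2.1 - 1, setCell st.2.2 st.2.1 (size + y) (PySem.Int.toStr st.1))
            else st) (0, size - 1, g)).1 > 0)
     then setCell ((PySem.List.pyRange (PySem.List.len board - 1) (-1) (-1)).foldl
          (fun (st : Int × Int × List (List String)) x =>
            if PySem.List.pyGetD (PySem.List.pyGetD board x []) y "" == "*" then
              (st.1 + 1, st.2.1, st.2.2)
            else if st.1 > 0 then
              (0, st.2.1 - 1, setCell st.2.2 st.2.1 (size + y) (PySem.Int.toStr st.1))
            else st) (0, size - 1, g)).2.2
          ((PySem.List.pyRange (PySem.List.len board - 1) (-1) (-1)).foldl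
          (fun (st : Int × Int × List (List String)) x =>
            if PySem.List.pyGetD (PySem.List.pyGetD board x []) y "" == "*" then
              (st.1 + 1, st.2.1, st.2.2)
            else if st.1 > 0 then
              (0, st.2.1 - 1, setCell st.2.2 st.2.1 (size + y) (PySem.Int.toStr st.1))
            else st) (0, size - 1, g)).2.1 (size + y)
          (PySem.Int.toStr ((PySem.List.pyRange (PySem.List.len board - 1) (-1) (-1)).foldl
          (fun (st : Int × Int × List (List String)) x =>
            if PySem.List.pyGetD (PySem.List.pyGetD board x []) y "" == "*" then
              (st.1 + 1, st.2.1, st.2.2)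
            else if st.1 > 0 then
              (0, st.2.1 - 1, setCell st.2.2 st.2.1 (size + y) (PySem.Int.toStr st.1))
            else st) (0, size - 1, g)).1)
     else ((PySem.List.pyRange (PySem.List.len board - 1) (-1) (-1)).foldl
          (fun (st : Int × Int × List (List String)) x =>
            if PySem.List.pyGetD (PySem.List.pyGetD board x []) y "" == "*" then
              (st.1 + 1, st.2.1, st.2.2)
            else if st.1 > 0 then
              (0, st.2.1 - 1, setCell st.2.2 st.2.1 (size + y) (PySem.Int.toStr st.1))
            else st) (0, size - 1, g)).2.2)
    =
    (PySem.List.enumerate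
        (if ((PySem.List.pyRange 0 (PySem.List.len board) 1).foldl
              (fun (st : List Int × Int) x =>
                if PySem.List.pyGetD (PySem.List.pyGetD board x []) y "" == "*" then (st.1, st.2 + 1)
                else if st.2 > 0 then (st.1 ++ [st.2], 0) else st) ([], 0)).2 > 0
         then ((PySem.List.pyRange 0 (PySem.List.len board) 1).foldl
              (fun (st : List Int × Int) x =>
                if PySem.List.pyGetD (PySem.List.pyGetD board x []) y "" == "*" then (st.1, st.2 + 1)
                else if st.2 > 0 then (st.1 ++ [st.2], 0) else st) ([], 0)).1
              ++ [((PySem.List.pyRange 0 (PySem.List.len board) 1).foldl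
              (fun (st : List Int × Int) x =>
                if PySem.List.pyGetD (PySem.List.pyGetD board x []) y "" == "*" then (st.1, st.2 + 1)
                else if st.2 > 0 then (st.1 ++ [st.2], 0) else st) ([], 0)).2]
         else ((PySem.List.pyRange 0 (PySem.List.len board) 1).foldl
              (fun (st : List Int × Int) x =>
                if PySem.List.pyGetD (PySem.List.pyGetD board x []) y "" == "*" then (st.1, st.2 + 1)
                else if st.2 > 0 then (st.1 ++ [st.2], 0) else st) ([], 0)).1).reverse).foldl
      (fun g p => setCell g (size - 1 - p.1) (size + y) (PySem.Int.toStr p.2)) g := by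
  -- A side
  rw [foldl_rows_rev board
      (f := fun (st : Int × Int × List (List String)) row =>
        if PySem.List.pyGetD row y "" == "*" then (st.1 + 1, st.2.1, st.2.2)
        else if st.1 > 0 then (0, st.2.1 - 1, setCell st.2.2 st.2.1 (size + y) (PySem.Int.toStr st.1))
        else st)]
  rw [loopA (fun row => PySem.List.pyGetD row y "" == "*") (size + y) board.reverse 0 (size - 1) g]
  -- B side
  rw [PySem.List.foldl_pyRange_zero_pyGetD board ([] : List String)
      (fun (st : List Int × Int) row =>
        if PySem.List.pyGetD row y "" == "*" then (st.1, st.2 + 1)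
        else if st.2 > 0 then (st.1 ++ [st.2], 0) else st) (([], 0) : List Int × Int)]
  rw [loopB (fun row => PySem.List.pyGetD row y "" == "*") board [] 0]
  rw [placeB (size + y) size _ 0 g]
  rw [List.nil_append, runsF_reverse]
  norm_num

theorem ports_eq (board : List (List String)) (size : Int) :
    make_ans_row board size = make_ans_row_alt board size := by
  unfold make_ans_row make_ans_row_alt
  dsimp only
  refine PySem.List.foldl_congr_mem _ _ _ _ ?_
  intro g y _
  exact colEq board size y g

-- ===== VERDICT (by name: the statement is the Claim_ definition above) =====
theorem make_ans_row_spec : Claim_equal_make_ans_row := by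
  intro board size _ _
  unfold Spec_make_ans_row
  exact ports_eq board size
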